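-- pv_equiv track=rewrite | github.com/mortyc126-debug/SHA | composition_gap.py | sha256_R_rounds
-- ===== SOURCE A (Python) =====
-- MASK = 0xFFFFFFFF
--
-- H0 = [0x6a09e667,0xbb67ae85,0x3c6ef372,0xa54ff53a,
--       0x510e527f,0x9b05688c,0x1f83d9ab,0x5be0cd19]
--
-- K = [0x428a2f98,0x71374491,0xb5c0fbcf,0xe9b5dba5,0x3956c25b,0x59f111f1,0x923f82a4,0xab1c5ed5,
--      0xd807aa98,0x12835b01,0x243185be,0x550c7dc3,0x72be5d74,0x80deb1fe,0x9bdc06a7,0xc19bf174,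
--      0xe49b69c1,0xefbe4786,0x0fc19dc6,0x240ca1cc,0x2de92c6f,0x4a7484aa,0x5cb0a9dc,0x76f988da,
--      0x983e5152,0xa831c66d,0xb00327c8,0xbf597fc7,0xc6e00bf3,0xd5a79147,0x06ca6351,0x14292967,
--      0x27b70a85,0x2e1b2138,0x4d2c6dfc,0x53380d13,0x650a7354,0x766a0abb,0x81c2c92e,0x92722c85,
--      0xa2bfe8a1,0xa81a664b,0xc24b8b70,0xc76c51a3,0xd192e819,0xd6990624,0xf40e3585,0x106aa070,
--      0x19a4c116,0x1e376c08,0x2748774c,0x34b0bcb5,0x391c0cb3,0x4ed8aa4a,0x5b9cca4f,0x682e6ff3,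
--      0x748f82ee,0x78a5636f,0x84c87814,0x8cc70208,0x90befffa,0xa4506ceb,0xbef9a3f7,0xc67178f2]
--
-- def rotr(x,n): return ((x>>n)|(x<<(32-n)))&MASK
--
-- def sig0(x): return rotr(x,7)^rotr(x,18)^(x>>3)
--
-- def sig1(x): return rotr(x,17)^rotr(x,19)^(x>>10)
--
-- def Sig0(x): return rotr(x,2)^rotr(x,13)^rotr(x,22)
--
-- def Sig1(x): return rotr(x,6)^rotr(x,11)^rotr(x,25)
--
-- def Ch(e,f,g): return (e&f)^(~e&g)&MASK
--
-- def Maj(a,b,c): return (a&b)^(a&c)^(b&c)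
--
-- def sha256_R_rounds(W0_val, R):
--     """SHA-256 truncated to R rounds, W[0]=W0_val, W[1..15]=0."""
--     W = [W0_val]+[0]*15+[0]*48
--     for i in range(16, 64):
--         W[i] = (sig1(W[i-2])+W[i-7]+sig0(W[i-15])+W[i-16]) & MASK
--     a,b,c,d,e,f,g,h = H0
--     for r in range(R):
--         T1=(h+Sig1(e)+Ch(e,f,g)+K[r]+W[r])&MASK
--         T2=(Sig0(a)+Maj(a,b,c))&MASK
--         h,g,f=g,f,e; e=(d+T1)&MASK; d,c,b=c,b,a; a=(T1+T2)&MASK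
--     return (e + H0[4]) & MASK  # return H[4] = e+IV[4] (partial)
-- ===== SOURCE B (Python) =====
-- MASK = 0xFFFFFFFF
--
-- H0 = [0x6a09e667,0xbb67ae85,0x3c6ef372,0xa54ff53a,
--       0x510e527f,0x9b05688c,0x1f83d9ab,0x5be0cd19]
--
-- K = [0x428a2f98,0x71374491,0xb5c0fbcf,0xe9b5dba5,0x3956c25b,0x59f111f1,0x923f82a4,0xab1c5ed5,
--      0xd807aa98,0x12835b01,0x243185be,0x550c7dc3,0x72be5d74,0x80deb1fe,0x9bdc06a7,0xc19bf174,
--      0xe49b69c1,0xefbe4786,0x0fc19dc6,0x240ca1cc,0x2de92c6f,0x4a7484aa,0x5cb0a9dc,0x76f988da,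
--      0x983e5152,0xa831c66d,0xb00327c8,0xbf597fc7,0xc6e00bf3,0xd5a79147,0x06ca6351,0x14292967,
--      0x27b70a85,0x2e1b2138,0x4d2c6dfc,0x53380d13,0x650a7354,0x766a0abb,0x81c2c92e,0x92722c85,
--      0xa2bfe8a1,0xa81a664b,0xc24b8b70,0xc76c51a3,0xd192e819,0xd6990624,0xf40e3585,0x106aa070,
--      0x19a4c116,0x1e376c08,0x2748774c,0x34b0bcb5,0x391c0cb3,0x4ed8aa4a,0x5b9cca4f,0x682e6ff3,
--      0x748f82ee,0x78a5636f,0x84c87814,0x8cc70208,0x90befffa,0xa4506ceb,0xbef9a3f7,0xc67178f2]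
--
-- def rotr(x,n): return ((x>>n)|(x<<(32-n)))&MASK
--
-- def sig0(x): return rotr(x,7)^rotr(x,18)^(x>>3)
--
-- def sig1(x): return rotr(x,17)^rotr(x,19)^(x>>10)
--
-- def Sig0(x): return rotr(x,2)^rotr(x,13)^rotr(x,22)
--
-- def Sig1(x): return rotr(x,6)^rotr(x,11)^rotr(x,25)
--
-- def Ch(e,f,g): return (e&f)^(~e&g)&MASK
--
-- def Maj(a,b,c): return (a&b)^(a&c)^(b&c)
--
-- def sha256_R_rounds(W0_val, R):
--     """SHA-256 truncated to R rounds, W[0]=W0_val, W[1..15]=0.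
--
--     Top-down memoized recursion: no arrays and no round loop.  The schedule
--     word w(i) and the register pair ae(r) = (a(r), e(r)) are defined directly
--     by their recurrences (seeded from H0 at r < 0) and evaluated on demand,
--     each with a memo dict.
--     """
--     wc, sc = {}, {}
--
--     def w(i):
--         if i < 16:
--             return W0_val if i == 0 else 0
--         if i not in wc:
--             wc[i] = (sig1(w(i-2)) + w(i-7) + sig0(w(i-15)) + w(i-16)) & MASK
--         return wc[i]
--
--     def ae(r):
--         if r < 0:
--             return H0[-1 - r], H0[3 - r]
--         if r not in sc:
--             a1, e1 = ae(r-1)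
--             a2, e2 = ae(r-2)
--             a3, e3 = ae(r-3)
--             a4, e4 = ae(r-4)
--             T1 = (e4 + Sig1(e1) + Ch(e1, e2, e3) + K[r] + w(r)) & MASK
--             T2 = (Sig0(a1) + Maj(a1, a2, a3)) & MASK
--             sc[r] = ((T1 + T2) & MASK, (a4 + T1) & MASK)
--         return sc[r]
--
--     return (ae(max(R, 0) - 1)[1] + H0[4]) & MASK
-- ===== Notes on version B (the rewrite author's own statement) =====
-- stated objective: alternative
-- what changed: B replaces A's array-filling schedule pass and 8-register round loop by top-down memoized recursion: the schedule word w(i) and the register pair ae(r)=(a(r),e(r)) are defined directly by their recurrences (seeded from H0 at r<0) and evaluated on demand with one memo dict each; no arrays, no loops, no register shuffling.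
-- outside the precondition, e.g. on sha256_R_rounds(1, 65): A raises IndexError, B raises IndexError
import Mathlib
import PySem

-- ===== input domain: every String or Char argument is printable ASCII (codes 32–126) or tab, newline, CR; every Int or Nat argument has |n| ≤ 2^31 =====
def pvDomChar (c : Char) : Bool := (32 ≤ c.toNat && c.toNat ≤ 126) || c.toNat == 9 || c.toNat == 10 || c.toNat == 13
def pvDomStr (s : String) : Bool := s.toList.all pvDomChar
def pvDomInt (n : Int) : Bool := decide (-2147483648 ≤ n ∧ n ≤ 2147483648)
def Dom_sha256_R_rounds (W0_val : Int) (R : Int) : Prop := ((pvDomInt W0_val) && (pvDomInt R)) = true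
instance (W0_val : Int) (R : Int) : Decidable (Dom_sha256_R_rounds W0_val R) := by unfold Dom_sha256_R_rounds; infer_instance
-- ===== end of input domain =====

-- B replaces A's array pass + 8-register round loop by top-down memoized recursion on the
-- recurrences w(i) and ae(r) = (a(r), e(r)) (one memo dict each); same cost, different algorithmic shape.

-- shared module-level constants and helpers (identical in Source A and Source B)
def pvMASK : Int := 0xFFFFFFFF

def pvH0 : List Int := [0x6a09e667,0xbb67ae85,0x3c6ef372,0xa54ff53a,
                        0x510e527f,0x9b05688c,0x1f83d9ab,0x5be0cd19]

def pvK : List Int := [0x428a2f98,0x71374491,0xb5c0fbcf,0xe9b5dba5,0x3956c25b,0x59f111f1,0x923f82a4,0xab1c5ed5,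
  0xd807aa98,0x12835b01,0x243185be,0x550c7dc3,0x72be5d74,0x80deb1fe,0x9bdc06a7,0xc19bf174,
  0xe49b69c1,0xefbe4786,0x0fc19dc6,0x240ca1cc,0x2de92c6f,0x4a7484aa,0x5cb0a9dc,0x76f988da,
  0x983e5152,0xa831c66d,0xb00327c8,0xbf597fc7,0xc6e00bf3,0xd5a79147,0x06ca6351,0x14292967,
  0x27b70a85,0x2e1b2138,0x4d2c6dfc,0x53380d13,0x650a7354,0x766a0abb,0x81c2c92e,0x92722c85,
  0xa2bfe8a1,0xa81a664b,0xc24b8b70,0xc76c51a3,0xd192e819,0xd6990624,0xf40e3585,0x106aa070,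
  0x19a4c116,0x1e376c08,0x2748774c,0x34b0bcb5,0x391c0cb3,0x4ed8aa4a,0x5b9cca4f,0x682e6ff3,
  0x748f82ee,0x78a5636f,0x84c87814,0x8cc70208,0x90befffa,0xa4506ceb,0xbef9a3f7,0xc67178f2]

def pvRotr (x : Int) (n : Nat) : Int :=
  PySem.Int.band (PySem.Int.bor (x >>> n) (x <<< (32 - n))) pvMASK

def pvSig0s (x : Int) : Int := PySem.Int.bxor (PySem.Int.bxor (pvRotr x 7) (pvRotr x 18)) (x >>> 3)
def pvSig1s (x : Int) : Int := PySem.Int.bxor (PySem.Int.bxor (pvRotr x 17) (pvRotr x 19)) (x >>> 10)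
def pvSig0U (x : Int) : Int := PySem.Int.bxor (PySem.Int.bxor (pvRotr x 2) (pvRotr x 13)) (pvRotr x 22)
def pvSig1U (x : Int) : Int := PySem.Int.bxor (PySem.Int.bxor (pvRotr x 6) (pvRotr x 11)) (pvRotr x 25)
-- Python precedence: (e&f) ^ ((~e&g)&MASK)
def pvCh (e f g : Int) : Int :=
  PySem.Int.bxor (PySem.Int.band e f) (PySem.Int.band (PySem.Int.band (Int.not e) g) pvMASK)
def pvMaj (a b c : Int) : Int :=
  PySem.Int.bxor (PySem.Int.bxor (PySem.Int.band a b) (PySem.Int.band a c)) (PySem.Int.band b c)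

-- ===== PORT A =====
-- W[i] = (sig1(W[i-2])+W[i-7]+sig0(W[i-15])+W[i-16]) & MASK  (pyGetD is exact under Pre_: all indices in range)
def pvWnextA (W : List Int) (i : Int) : Int :=
  PySem.Int.band (pvSig1s (PySem.List.pyGetD W (i-2) 0) + PySem.List.pyGetD W (i-7) 0
                  + pvSig0s (PySem.List.pyGetD W (i-15) 0) + PySem.List.pyGetD W (i-16) 0) pvMASK

def pvStepA (W : List Int) (st : Int × Int × Int × Int × Int × Int × Int × Int) (r : Int) :
    Int × Int × Int × Int × Int × Int × Int × Int :=
  match st with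
  | (a, b, c, d, e, f, g, h) =>
    let T1 := PySem.Int.band (h + pvSig1U e + pvCh e f g + PySem.List.pyGetD pvK r 0
                              + PySem.List.pyGetD W r 0) pvMASK
    let T2 := PySem.Int.band (pvSig0U a + pvMaj a b c) pvMASK
    (PySem.Int.band (T1 + T2) pvMASK, a, b, c, PySem.Int.band (d + T1) pvMASK, e, f, g)

def sha256_R_rounds (W0_val : Int) (R : Int) : Int :=
  let W := (PySem.List.pyRange 16 64 1).foldl
             (fun W i => PySem.List.pySetD W i (pvWnextA W i))
             (([W0_val] ++ List.replicate 15 0) ++ List.replicate 48 0)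
  let s := (PySem.List.pyRange 0 R 1).foldl (pvStepA W)
             (0x6a09e667, 0xbb67ae85, 0x3c6ef372, 0xa54ff53a, 0x510e527f, 0x9b05688c, 0x1f83d9ab, 0x5be0cd19)
  PySem.Int.band (s.2.2.2.2.1 + PySem.List.pyGetD pvH0 4 0) pvMASK

-- ===== PORT B =====
-- Source B's memoized recursion; each function returns (value, updated memo state).
-- 'i not in wc' is the get? none/some test; 'wc[i] = v; return wc[i]' is (v, wc.insert i v).

-- def w(i) with memo dict wc
def pvWrec (W0 : Int) (i : Int) (wc : PySem.Dict Int Int) : Int × PySem.Dict Int Int :=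
  if i < 16 then ((if i == 0 then W0 else 0), wc)
  else
    match PySem.Dict.get? wc i with
    | some v => (v, wc)
    | none =>
      let p2 := pvWrec W0 (i-2) wc
      let p7 := pvWrec W0 (i-7) p2.2
      let p15 := pvWrec W0 (i-15) p7.2
      let p16 := pvWrec W0 (i-16) p15.2
      let v := PySem.Int.band (pvSig1s p2.1 + p7.1 + pvSig0s p15.1 + p16.1) pvMASK
      (v, PySem.Dict.insert p16.2 i v)
termination_by i.toNat
decreasing_by all_goals
  rename_i h
  exact (Int.toNat_lt_toNat (lt_of_lt_of_le (by decide) (not_lt.mp h))).mpr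
    (sub_lt_self _ (by decide))

-- memo state (wc, sc); sc memoizes the register pair ae(r) = (a(r), e(r))
def pvAErec (W0 : Int) (r : Int) (st : PySem.Dict Int Int × PySem.Dict Int (Int × Int)) :
    (Int × Int) × (PySem.Dict Int Int × PySem.Dict Int (Int × Int)) :=
  if r < 0 then ((PySem.List.pyGetD pvH0 (-1 - r) 0, PySem.List.pyGetD pvH0 (3 - r) 0), st)
  else
    match PySem.Dict.get? st.2 r with
    | some p => (p, st)
    | none =>
      let p1 := pvAErec W0 (r-1) st
      let p2 := pvAErec W0 (r-2) p1.2
      let p3 := pvAErec W0 (r-3) p2.2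
      let p4 := pvAErec W0 (r-4) p3.2
      let pw := pvWrec W0 r p4.2.1
      let T1 := PySem.Int.band (p4.1.2 + pvSig1U p1.1.2 + pvCh p1.1.2 p2.1.2 p3.1.2
                  + PySem.List.pyGetD pvK r 0 + pw.1) pvMASK
      let T2 := PySem.Int.band (pvSig0U p1.1.1 + pvMaj p1.1.1 p2.1.1 p3.1.1) pvMASK
      let v := (PySem.Int.band (T1 + T2) pvMASK, PySem.Int.band (p4.1.1 + T1) pvMASK)
      (v, (pw.2, PySem.Dict.insert p4.2.2 r v))
termination_by (r + 5).toNat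
decreasing_by all_goals
  rename_i h
  exact (Int.toNat_lt_toNat (add_pos_of_nonneg_of_pos (not_lt.mp h) (by decide))).mpr
    (by rw [sub_add_eq_add_sub]; exact sub_lt_self _ (by decide))

def sha256_R_rounds_alt (W0_val : Int) (R : Int) : Int :=
  let st0 : PySem.Dict Int Int × PySem.Dict Int (Int × Int) := (PySem.Dict.empty, PySem.Dict.empty)
  PySem.Int.band ((pvAErec W0_val (max R 0 - 1) st0).1.2 + PySem.List.pyGetD pvH0 4 0) pvMASK

-- ===== PRECONDITION & SPEC =====
-- Pre_ excludes exactly R > 64, where Python's K[r] raises IndexError in round 64 (both A and B).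
def Pre_sha256_R_rounds (W0_val : Int) (R : Int) : Prop := R ≤ 64
instance (W0_val : Int) (R : Int) : Decidable (Pre_sha256_R_rounds W0_val R) := by
  unfold Pre_sha256_R_rounds; infer_instance

def pvWitness_sha256_R_rounds : Int × Int := (5, 8)

def Spec_sha256_R_rounds (W0_val : Int) (R : Int) (out : Int) : Prop := out = sha256_R_rounds_alt W0_val R
instance (W0_val : Int) (R : Int) (out : Int) : Decidable (Spec_sha256_R_rounds W0_val R out) := by
  unfold Spec_sha256_R_rounds; infer_instance

-- ===== CLAIM (what is proved, stated in full; the proofs are below) =====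
def Claim_equal_sha256_R_rounds : Prop := ∀ (W0_val : Int) (R : Int), Dom_sha256_R_rounds W0_val R → Pre_sha256_R_rounds W0_val R → Spec_sha256_R_rounds W0_val R (sha256_R_rounds W0_val R)

-- ===== LEMMAS AND PROOFS =====

-- pure (memo-free) specifications of the three recurrences
def pvWS (W0 : Int) (i : Int) : Int :=
  if i < 16 then (if i == 0 then W0 else 0)
  else PySem.Int.band (pvSig1s (pvWS W0 (i-2)) + pvWS W0 (i-7)
        + pvSig0s (pvWS W0 (i-15)) + pvWS W0 (i-16)) pvMASK
termination_by i.toNat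
decreasing_by all_goals
  rename_i h
  exact (Int.toNat_lt_toNat (lt_of_lt_of_le (by decide) (not_lt.mp h))).mpr
    (sub_lt_self _ (by decide))

def pvAES (W0 : Int) (r : Int) : Int × Int :=
  if r < 0 then (PySem.List.pyGetD pvH0 (-1 - r) 0, PySem.List.pyGetD pvH0 (3 - r) 0)
  else
    let T1 := PySem.Int.band ((pvAES W0 (r-4)).2 + pvSig1U (pvAES W0 (r-1)).2
                + pvCh (pvAES W0 (r-1)).2 (pvAES W0 (r-2)).2 (pvAES W0 (r-3)).2
                + PySem.List.pyGetD pvK r 0 + pvWS W0 r) pvMASK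
    let T2 := PySem.Int.band (pvSig0U (pvAES W0 (r-1)).1
                + pvMaj (pvAES W0 (r-1)).1 (pvAES W0 (r-2)).1 (pvAES W0 (r-3)).1) pvMASK
    (PySem.Int.band (T1 + T2) pvMASK, PySem.Int.band ((pvAES W0 (r-4)).1 + T1) pvMASK)
termination_by (r + 5).toNat
decreasing_by all_goals
  rename_i h
  exact (Int.toNat_lt_toNat (add_pos_of_nonneg_of_pos (not_lt.mp h) (by decide))).mpr
    (by rw [sub_add_eq_add_sub]; exact sub_lt_self _ (by decide))

-- memo-dict invariants
def pvInvW (W0 : Int) (wc : PySem.Dict Int Int) : Prop :=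
  ∀ i v, wc.get? i = some v → v = pvWS W0 i

def pvInvSt (W0 : Int) (st : PySem.Dict Int Int × PySem.Dict Int (Int × Int)) : Prop :=
  pvInvW W0 st.1 ∧ (∀ r p, st.2.get? r = some p → p = pvAES W0 r)

lemma pvWrec_correct (W0 : Int) : ∀ (n : Nat) (i : Int), i.toNat ≤ n → ∀ wc, pvInvW W0 wc →
    (pvWrec W0 i wc).1 = pvWS W0 i ∧ pvInvW W0 (pvWrec W0 i wc).2 := by
  intro n
  induction n with
  | zero =>
    intro i hin wc hwc
    have h16 : i < 16 := by omega
    rw [pvWrec, if_pos h16, pvWS, if_pos h16]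
    exact ⟨rfl, hwc⟩
  | succ n ih =>
    intro i hin wc hwc
    by_cases h16 : i < 16
    · rw [pvWrec, if_pos h16, pvWS, if_pos h16]
      exact ⟨rfl, hwc⟩
    · rw [pvWrec, if_neg h16]
      cases hg : PySem.Dict.get? wc i with
      | some v =>
        exact ⟨hwc i v hg, hwc⟩
      | none =>
        obtain ⟨h2v, h2i⟩ := ih (i-2) (by omega) wc hwc
        obtain ⟨h7v, h7i⟩ := ih (i-7) (by omega) _ h2i
        obtain ⟨h15v, h15i⟩ := ih (i-15) (by omega) _ h7i
        obtain ⟨h16v, h16i⟩ := ih (i-16) (by omega) _ h15i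
        dsimp only
        rw [h2v, h7v, h15v, h16v]
        constructor
        · conv_rhs => rw [pvWS]
          rw [if_neg h16]
        · intro j u hj
          rw [PySem.Dict.get?_insert] at hj
          by_cases hji : j = i
          · rw [if_pos hji] at hj
            cases hj
            rw [hji]
            conv_rhs => rw [pvWS]
            rw [if_neg h16]
          · rw [if_neg hji] at hj
            exact h16i j u hj

lemma pvAErec_correct (W0 : Int) : ∀ (n : Nat) (r : Int), (r + 5).toNat ≤ n →
    ∀ st, pvInvSt W0 st →
    (pvAErec W0 r st).1 = pvAES W0 r ∧ pvInvSt W0 (pvAErec W0 r st).2 := by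
  intro n
  induction n with
  | zero =>
    intro r hrn st hst
    have hr : r < 0 := by omega
    rw [pvAErec, if_pos hr]
    exact ⟨by rw [pvAES, if_pos hr], hst⟩
  | succ n ih =>
    intro r hrn st hst
    by_cases hr : r < 0
    · rw [pvAErec, if_pos hr]
      exact ⟨by rw [pvAES, if_pos hr], hst⟩
    · rw [pvAErec, if_neg hr]
      cases hg : PySem.Dict.get? st.2 r with
      | some p => exact ⟨hst.2 r p hg, hst⟩
      | none =>
        obtain ⟨p1v, p1i⟩ := ih (r-1) (by omega) st hst
        obtain ⟨p2v, p2i⟩ := ih (r-2) (by omega) _ p1i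
        obtain ⟨p3v, p3i⟩ := ih (r-3) (by omega) _ p2i
        obtain ⟨p4v, p4i⟩ := ih (r-4) (by omega) _ p3i
        obtain ⟨xw, xs⟩ := p4i
        obtain ⟨wv, wi⟩ := pvWrec_correct W0 r.toNat r le_rfl _ xw
        dsimp only
        rw [p1v, p2v, p3v, p4v, wv]
        constructor
        · conv_rhs => rw [pvAES]
          rw [if_neg hr]
        · refine ⟨wi, ?_⟩
          intro j u hj
          rw [PySem.Dict.get?_insert] at hj
          by_cases hji : j = r
          · rw [if_pos hji] at hj
            cases hj
            rw [hji]
            conv_rhs => rw [pvAES]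
            rw [if_neg hr]
          · rw [if_neg hji] at hj
            exact xs j u hj

-- A's schedule fill computes pvWS pointwise
lemma pvWfill (W0 : Int) : ∀ (k : Nat) (j : Nat) (L : List Int), j + k = 64 → 16 ≤ j →
    L.length = 64 → (∀ i : Nat, i < j → L.getD i 0 = pvWS W0 i) →
    (((PySem.List.pyRange (j : Int) 64 1).foldl
        (fun W i => PySem.List.pySetD W i (pvWnextA W i)) L).length = 64
     ∧ ∀ i : Nat, i < 64 →
        ((PySem.List.pyRange (j : Int) 64 1).foldl
          (fun W i => PySem.List.pySetD W i (pvWnextA W i)) L).getD i 0 = pvWS W0 i) := by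
  intro k
  induction k with
  | zero =>
    intro j L hj64 hj16 hlen hpre
    rw [PySem.List.pyRange_one_eq_nil (by omega)]
    exact ⟨hlen, fun i hi => hpre i (by omega)⟩
  | succ k ihk =>
    intro j L hj64 hj16 hlen hpre
    rw [PySem.List.pyRange_one_cons (by exact_mod_cast Nat.lt_of_lt_of_le (Nat.lt_succ_self _) (by omega) : (j:Int) < 64)]
    simp only [List.foldl_cons]
    have hgetj : ∀ (m : Nat), 0 < m → m ≤ 16 →
        PySem.List.pyGetD L ((j:Int) - m) 0 = pvWS W0 ((j:Int) - m) := by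
      intro m hm hm16
      have hc : (j:Int) - m = ((j - m : Nat) : Int) := by omega
      rw [hc, PySem.List.pyGetD_natCast]
      rw [hpre (j - m) (by omega)]
    have hnext : pvWnextA L (j:Int) = pvWS W0 (j:Int) := by
      unfold pvWnextA
      rw [show (j:Int) - 2 = (j:Int) - (2:Nat) by norm_num,
          show (j:Int) - 7 = (j:Int) - (7:Nat) by norm_num,
          show (j:Int) - 15 = (j:Int) - (15:Nat) by norm_num,
          show (j:Int) - 16 = (j:Int) - (16:Nat) by norm_num]
      rw [hgetj 2 (by omega) (by omega), hgetj 7 (by omega) (by omega),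
          hgetj 15 (by omega) (by omega), hgetj 16 (by omega) (by omega)]
      conv_rhs => rw [pvWS]
      rw [if_neg (by omega)]
      norm_num
    rw [PySem.List.pySetD_natCast, hnext]
    have hres := ihk (j+1) (L.set j (pvWS W0 (j:Int)))
      (show j + 1 + k = 64 by omega) (by omega) (by rw [List.length_set]; exact hlen)
      (by
        intro i hi
        by_cases hij : i = j
        · subst hij
          rw [List.getD_eq_getElem _ _ (by rw [List.length_set, hlen]; omega), List.getElem_set_self (by rw [List.length_set, hlen]; omega)]
        · rw [List.getD_eq_getElem?_getD, List.getElem?_set_ne (by omega), ← List.getD_eq_getElem?_getD]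
          exact hpre i (by omega))
    push_cast at hres ⊢
    exact hres

lemma pvAES_neg (W0 r : Int) (h : r < 0) :
    pvAES W0 r = (PySem.List.pyGetD pvH0 (-1 - r) 0, PySem.List.pyGetD pvH0 (3 - r) 0) := by
  rw [pvAES, if_pos h]

-- A's round loop computes the pvAES register sequence
lemma pvRoundsA (W0 : Int) (L : List Int)
    (hL : ∀ i : Nat, i < 64 → L.getD i 0 = pvWS W0 i) :
    ∀ (n : Nat), n ≤ 64 →
    (PySem.List.pyRange 0 (n : Int) 1).foldl (pvStepA L)
      (0x6a09e667, 0xbb67ae85, 0x3c6ef372, 0xa54ff53a, 0x510e527f, 0x9b05688c, 0x1f83d9ab, 0x5be0cd19)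
    = ((pvAES W0 ((n : Int) - 1)).1, (pvAES W0 ((n : Int) - 2)).1, (pvAES W0 ((n : Int) - 3)).1,
       (pvAES W0 ((n : Int) - 4)).1, (pvAES W0 ((n : Int) - 1)).2, (pvAES W0 ((n : Int) - 2)).2,
       (pvAES W0 ((n : Int) - 3)).2, (pvAES W0 ((n : Int) - 4)).2) := by
  intro n
  induction n with
  | zero =>
    intro _
    rw [show ((0:Nat):Int) = 0 by norm_num, PySem.List.pyRange_one_eq_nil le_rfl, List.foldl_nil]
    norm_num
    rw [pvAES_neg W0 (-1) (by norm_num), pvAES_neg W0 (-2) (by norm_num),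
        pvAES_neg W0 (-3) (by norm_num), pvAES_neg W0 (-4) (by norm_num)]
    decide
  | succ n ihn =>
    intro hn64
    have hcast : ((n+1 : Nat) : Int) = (n : Int) + 1 := by push_cast; ring
    rw [hcast, PySem.List.pyRange_one_succ_right (by positivity), List.foldl_append,
        List.foldl_cons, List.foldl_nil, ihn (by omega)]
    have h1 : (n:Int) + 1 - 1 = (n:Int) := by ring
    have h2 : (n:Int) + 1 - 2 = (n:Int) - 1 := by ring
    have h3 : (n:Int) + 1 - 3 = (n:Int) - 2 := by ring
    have h4 : (n:Int) + 1 - 4 = (n:Int) - 3 := by ring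
    rw [h1, h2, h3, h4]
    have hW : PySem.List.pyGetD L ((n:Nat):Int) 0 = pvWS W0 ((n:Nat):Int) := by
      rw [PySem.List.pyGetD_natCast]
      exact hL n (by omega)
    have hAE : pvAES W0 ((n:Nat):Int) =
        (PySem.Int.band
          (PySem.Int.band ((pvAES W0 ((n:Int)-4)).2 + pvSig1U (pvAES W0 ((n:Int)-1)).2
             + pvCh (pvAES W0 ((n:Int)-1)).2 (pvAES W0 ((n:Int)-2)).2 (pvAES W0 ((n:Int)-3)).2
             + PySem.List.pyGetD pvK ((n:Nat):Int) 0 + pvWS W0 ((n:Nat):Int)) pvMASK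
           + PySem.Int.band (pvSig0U (pvAES W0 ((n:Int)-1)).1
               + pvMaj (pvAES W0 ((n:Int)-1)).1 (pvAES W0 ((n:Int)-2)).1 (pvAES W0 ((n:Int)-3)).1) pvMASK) pvMASK,
         PySem.Int.band ((pvAES W0 ((n:Int)-4)).1
           + PySem.Int.band ((pvAES W0 ((n:Int)-4)).2 + pvSig1U (pvAES W0 ((n:Int)-1)).2
               + pvCh (pvAES W0 ((n:Int)-1)).2 (pvAES W0 ((n:Int)-2)).2 (pvAES W0 ((n:Int)-3)).2
               + PySem.List.pyGetD pvK ((n:Nat):Int) 0 + pvWS W0 ((n:Nat):Int)) pvMASK) pvMASK) := by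
      rw [pvAES, if_neg (by omega)]
    rw [hAE]
    simp only [pvStepA]
    rw [hW]

-- ===== VERDICT (by name: the statement is the Claim_ definition above) =====
theorem sha256_R_rounds_spec : Claim_equal_sha256_R_rounds := by
  intro W0 R hDom hPre
  simp only [Spec_sha256_R_rounds, sha256_R_rounds, sha256_R_rounds_alt]
  have hempty : pvInvSt W0 (PySem.Dict.empty, PySem.Dict.empty) := by
    refine ⟨?_, ?_⟩ <;> intro i v h <;> simp [PySem.Dict.get?_empty] at h
  have hpre0 : ∀ i : Nat, i < 16 →
      (([W0] ++ List.replicate 15 0) ++ List.replicate 48 0).getD i 0 = pvWS W0 (i : Int) := by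
    intro i hi
    rw [pvWS, if_pos (by exact_mod_cast hi)]
    interval_cases i <;> rfl
  have hfill := pvWfill W0 48 16 (([W0] ++ List.replicate 15 0) ++ List.replicate 48 0)
    (by norm_num) le_rfl (by simp) hpre0
  rw [show (((16:Nat)):Int) = (16:Int) by norm_num] at hfill
  obtain ⟨-, hvals⟩ := hfill
  have hP : R ≤ 64 := hPre
  by_cases hR0 : 0 ≤ R
  · have hRn : R = ((R.toNat : Nat) : Int) := by omega
    rw [hRn]
    rw [pvRoundsA W0 _ hvals R.toNat (by omega)]
    rw [max_eq_left (by positivity : (0:Int) ≤ ((R.toNat : Nat) : Int))]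
    obtain ⟨ev, -⟩ := pvAErec_correct W0 (((R.toNat:Int) - 1 + 5).toNat) ((R.toNat:Int) - 1)
      le_rfl _ hempty
    rw [ev]
  · rw [PySem.List.pyRange_one_eq_nil (show R ≤ (0:Int) by omega), List.foldl_nil]
    rw [max_eq_right (by omega : R ≤ (0:Int))]
    obtain ⟨ev, -⟩ := pvAErec_correct W0 4 (-1 : Int) (by norm_num) _ hempty
    norm_num at ev ⊢
    rw [ev, pvAES_neg W0 (-1) (by norm_num)]
    decide
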